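/- GENERATED by tools/from_farm_form.py from farm/worked/ldexp/Lemmas.lean (a worked proof of the farm's unit `ldexp`,
   accepted by the verdict) — do not edit. -/
import ProgX.Base.Spec.Units.ldexp

open X86 X86.User Asan ProgX.Base

set_option maxRecDepth 4000
set_option maxHeartbeats 4000000

namespace ProgX.Base.Spec.Proved.ldexp
open ProgX.Base.Spec.ldexp (Statement)

/-- What holds of a state `s` inside the body of `ldexp` (after the prologue `push rbx ; sub rsp, 8`), relative to the entry
state `u`: the frame is the prologue's, only the frame was written, the two slots the exit (`pop rbx ; ret`) reads hold what
they held. -/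
structure Body_w (u₀ u : State) (ret : Word) (s : State) : Prop where
  /-- the stack pointer is the prologue's -/
  rsp : s.reg .rsp = u.reg .rsp - 16
  /-- the registers the ABI keeps over a call, but rbx -/
  kept : RegsKept [Reg.rdi, Reg.rbx, Reg.rsp, Reg.rax, Reg.rcx, Reg.rdx, Reg.rsi, Reg.r8, Reg.r9, Reg.r10, Reg.r11, Reg.r16,
      Reg.r17, Reg.r18, Reg.r19, Reg.r20, Reg.r21, Reg.r22, Reg.r23, Reg.r24, Reg.r25, Reg.r26, Reg.r27, Reg.r28, Reg.r29,
      Reg.r30, Reg.r31] u s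
  /-- only the 24 bytes of the frame were written -/
  same : Mem.SameExcept [⟨(u.reg .rsp).toNat - 24, (u.reg .rsp).toNat⟩] u.mem s.mem
  /-- no store went to the shadow -/
  un : ShadowUntouched u.mem s.mem
  /-- the slot of the saved rbx -/
  slotRbx : UInt64.ofNat (s.mem.readLE (u.reg .rsp - 8) 8) = u.reg .rbx
  /-- the slot of the return address -/
  slotRet : UInt64.ofNat (s.mem.readLE (u.reg .rsp) 8) = ret
  /-- the text is that of the reference state -/
  eq : Mem.EqOn ProgX.Base.L.textLo ProgX.Base.L.textHi u₀.mem s.mem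
  /-- the direction flag is clear -/
  df : s.flags .df = false
  /-- the SSE exceptions are masked -/
  mx : s.mxcsr &&& 0x1F80 = 0x1F80

/-- **After the return of a call of `two_to`** made from the body of `ldexp` (`e`: the state at the callee's entry, the return
address pushed below the frame; `r`: the state the callee's contract returns): the body's facts hold again. The arguments
are the hypotheses the walker leaves after a call (`w_same`, `w_code`, `w_inv`, `w_post`, `w_rsp`, `w_kept`). -/
theorem Body_w.of_return {u₀ : State} {others : List Obj} {frames : List (Nat × FrameLayout)} {u : State} {ret : Word}
    (he_room : 0x700000 + 24 ≤ (u.reg .rsp).toNat) (he_top : (u.reg .rsp).toNat + 8 ≤ 0x800000)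
    {e r : State} (hrspE : e.reg .rsp = u.reg .rsp - 24)
    (hsameE : Mem.SameExcept [⟨(u.reg .rsp).toNat - 24, (u.reg .rsp).toNat⟩] u.mem e.mem)
    (hunE : ShadowUntouched u.mem e.mem)
    (hs1E : UInt64.ofNat (e.mem.readLE (u.reg .rsp - 8) 8) = u.reg .rbx)
    (hs0E : UInt64.ofNat (e.mem.readLE (u.reg .rsp) 8) = ret)
    (w_rsp : r.reg .rsp = u.reg .rsp - 16)
    (w_kept : RegsKept [Reg.rdi, Reg.rbx, Reg.rsp, Reg.rax, Reg.rcx, Reg.rdx, Reg.rsi, Reg.r8, Reg.r9, Reg.r10, Reg.r11,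
      Reg.r16, Reg.r17, Reg.r18, Reg.r19, Reg.r20, Reg.r21, Reg.r22, Reg.r23, Reg.r24, Reg.r25, Reg.r26, Reg.r27, Reg.r28,
      Reg.r29, Reg.r30, Reg.r31] u r)
    (w_same : Mem.SameExcept ((ProgX.Base.Spec.two_to.spec others frames).footprint e) e.mem r.mem)
    (w_code : (ProgX.Base.conv u₀).code.In r.mem) (w_inv : (ProgX.Base.conv u₀).inv r)
    (w_post : (ProgX.Base.Spec.two_to.spec others frames).post e r) : Body_w u₀ u ret r := by
  simp only [X86.User.Spec.footprint, vspec, hrspE] at w_same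
  -- the two slots the exit (`pop rbx ; ret`) reads: the callee wrote nothing (its window is empty)
  have hs1 : UInt64.ofNat (r.mem.readLE (u.reg .rsp - 8) 8) = u.reg .rbx := by u_frame hs1E
  have hs0 : UInt64.ofNat (r.mem.readLE (u.reg .rsp) 8) = ret := by u_frame hs0E
  have hsame : Mem.SameExcept [⟨(u.reg .rsp).toNat - 24, (u.reg .rsp).toNat⟩] u.mem r.mem := by
    u_same
  -- the shadow: the callee's post (SH8) after ours
  have hpost : ShadowUntouched e.mem r.mem := w_post
  have hun : ShadowUntouched u.mem r.mem := Mem.EqOn.trans hunE hpost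
  have hinv : abiInv r := w_inv
  exact ⟨w_rsp, w_kept, hsame, hun, hs1, hs0, ProgX.Base.conv_code_eqOn w_code, hinv.1, hinv.2⟩

/-- 0x1022ab, libm.c:45–46: after the last call of `two_to`: `mulsd xmm0, [rsp] ; add rsp, 8 ; pop rbx ; ret`. -/
theorem final_mul_w {Lay : Layout} (hLay : Lay.hi = 0x1000000) {μ : Microarch} (hμ : UserX.MicroOK μ) {u₀ : State}
    (hcode : HasCodeNat Lay u₀ ProgX.Base.L.ldexp.entry ProgX.Base.Code.code_ldexp.nat ProgX.Base.L.ldexp.size)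
    {others : List Obj} {frames : List (Nat × FrameLayout)} {u : State} {ret : Word}
    (he : AtEntry (ProgX.Base.conv u₀) ProgX.Base.L.ldexp.entry (ProgX.Base.Spec.ldexp.spec others frames).frame ret u)
    (hpre : ShadowPre others frames u) {s : State} (hrip : s.rip = ProgX.Base.L.ldexp.ret3) (hb : Body_w u₀ u ret s) :
    ReachVia Lay μ ProgX.Base.WayInv s (Returned (ProgX.Base.conv u₀) (ProgX.Base.Spec.ldexp.spec others frames) u ret) := by
  v_entry he
  have hsp := hpre.rsp
  obtain ⟨w_rsp, w_kept, hsame, hun, hs1, hs0, w_eq, hdf, hmx⟩ := hb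
  have hsse : SseOK s := SseOK.of_masks hmx
  u_walk hcode [hμ.vendor] span [ProgX.Base.L.textLo, ProgX.Base.L.textHi] side (v_side)
  -- the state after the `ret`: the contract's `Returned`
  refine ReachVia.done ?_
  v_returned
  -- the post: no store went to the shadow (the three instructions store nothing)
  show ShadowUntouched u.mem s_1022b5.mem
  rw [w_mem]
  exact hun

/-- 0x1022a4: `mov edi, ebx`, where every path of `ldexp` joins before the last call (`L.ldexp.ret3 - 7`; no cut point there,
so no label of Vorbis/Labels.lean). -/
abbrev join_w : Word := 0x1022a4

/-- 0x1022a4, libm.c:45: `mov edi, ebx ; call two_to`, then `final_mul_w`. -/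
theorem last_call_w {Lay : Layout} (hLay : Lay.hi = 0x1000000) {μ : Microarch} (hμ : UserX.MicroOK μ) {u₀ : State}
    (hcode : HasCodeNat Lay u₀ ProgX.Base.L.ldexp.entry ProgX.Base.Code.code_ldexp.nat ProgX.Base.L.ldexp.size)
    {others : List Obj} {frames : List (Nat × FrameLayout)}
    (htt : Calls Lay μ ProgX.Base.WayInv (ProgX.Base.conv u₀) ProgX.Base.L.two_to.entry (ProgX.Base.Spec.two_to.spec others frames))
    {u : State} {ret : Word}
    (he : AtEntry (ProgX.Base.conv u₀) ProgX.Base.L.ldexp.entry (ProgX.Base.Spec.ldexp.spec others frames).frame ret u)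
    (hpre : ShadowPre others frames u) {s : State} (hrip : s.rip = join_w) (hb : Body_w u₀ u ret s) :
    ReachVia Lay μ ProgX.Base.WayInv s (Returned (ProgX.Base.conv u₀) (ProgX.Base.Spec.ldexp.spec others frames) u ret) := by
  have he' := he
  v_entry he
  have hsp := hpre.rsp
  obtain ⟨w_rsp, w_kept, hsame, hun, hs1, hs0, w_eq, hdf, hmx⟩ := hb
  have hsse : SseOK s := SseOK.of_masks hmx
  u_walk hcode [hμ.vendor] span [ProgX.Base.L.textLo, ProgX.Base.L.textHi] side (v_side)
  · -- call_inv: DF and the MXCSR masks at the entry of `two_to`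
    v_inv
  · -- the precondition of `two_to`: the shadow layer with the clean stack ending 16 bytes lower
    have hun' : ShadowUntouched u.mem s_1022a6.mem := by v_untouched
    refine ⟨?_, hpre.offText⟩
    refine (hpre.inv.untouched hun').lower ?_ ?_ ?_
    · rw [w_rsp]
      u_omega
    · rw [w_rsp]
      u_omega
    · rw [w_rsp]
      u_omega
  -- 0x1022ab (cut3): after the return of `two_to`
  have hsameE : Mem.SameExcept [⟨(u.reg .rsp).toNat - 24, (u.reg .rsp).toNat⟩] u.mem s_1022a6.mem := by u_same
  have hunE : ShadowUntouched u.mem s_1022a6.mem := by v_untouched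
  have hs1E : UInt64.ofNat (s_1022a6.mem.readLE (u.reg .rsp - 8) 8) = u.reg .rbx := by u_resolve
  have hs0E : UInt64.ofNat (s_1022a6.mem.readLE (u.reg .rsp) 8) = ret := by u_resolve
  exact final_mul_w hLay hμ hcode he' hpre w_rip
    (Body_w.of_return he_room he_top w_rsp_1022a6 hsameE hunE hs1E hs0E w_rsp w_kept w_same w_code w_inv w_post)

/-- **One more spill of `x`** (`movsd [rsp], xmm`: the 8 bytes at `rsp₀ - 16`) from a state of the body: the body's facts hold
again. The arguments are the hypotheses the walker leaves at the state `t` it stops at. -/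
theorem Body_w.spill {u₀ u : State} {ret : Word} {s t : State}
    (he_room : 0x700000 + 24 ≤ (u.reg .rsp).toNat) (he_top : (u.reg .rsp).toNat + 8 ≤ 0x800000)
    (hb : Body_w u₀ u ret s) {x : Nat}
    (w_rsp : t.reg .rsp = u.reg .rsp - 16)
    (w_kept : RegsKept [Reg.rdi, Reg.rbx, Reg.rsp, Reg.rax, Reg.rcx, Reg.rdx, Reg.rsi, Reg.r8, Reg.r9, Reg.r10, Reg.r11,
      Reg.r16, Reg.r17, Reg.r18, Reg.r19, Reg.r20, Reg.r21, Reg.r22, Reg.r23, Reg.r24, Reg.r25, Reg.r26, Reg.r27, Reg.r28,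
      Reg.r29, Reg.r30, Reg.r31] u t)
    (w_mem : t.mem = s.mem.writeLE (u.reg .rsp - 16) 8 x)
    (w_eq : Mem.EqOn ProgX.Base.L.textLo ProgX.Base.L.textHi u₀.mem t.mem)
    (hdf : t.flags .df = false) (hmx : t.mxcsr &&& 0x1F80 = 0x1F80) : Body_w u₀ u ret t := by
  obtain ⟨_, _, hsame, hun, hs1, hs0, _, _, _⟩ := hb
  have hsame' : Mem.SameExcept [⟨(u.reg .rsp).toNat - 24, (u.reg .rsp).toNat⟩] u.mem t.mem := by
    u_same
  have hun' : ShadowUntouched u.mem t.mem := by v_untouched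
  have hs1' : UInt64.ofNat (t.mem.readLE (u.reg .rsp - 8) 8) = u.reg .rbx := by u_frame hs1
  have hs0' : UInt64.ofNat (t.mem.readLE (u.reg .rsp) 8) = ret := by u_frame hs0
  exact ⟨w_rsp, w_kept, hsame', hun', hs1', hs0', w_eq, hdf, hmx⟩

/-- 0x10221e (cut1), libm.c:25–31: after the return of `two_to(1023)`: up to two more multiplications, selected by signed
comparisons of `ebx - 1023`, `ebx - 2046`; every path joins at 0x1022a4. -/
theorem high_tail_w {Lay : Layout} (hLay : Lay.hi = 0x1000000) {μ : Microarch} (hμ : UserX.MicroOK μ) {u₀ : State}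
    (hcode : HasCodeNat Lay u₀ ProgX.Base.L.ldexp.entry ProgX.Base.Code.code_ldexp.nat ProgX.Base.L.ldexp.size)
    {others : List Obj} {frames : List (Nat × FrameLayout)}
    (htt : Calls Lay μ ProgX.Base.WayInv (ProgX.Base.conv u₀) ProgX.Base.L.two_to.entry (ProgX.Base.Spec.two_to.spec others frames))
    {u : State} {ret : Word}
    (he : AtEntry (ProgX.Base.conv u₀) ProgX.Base.L.ldexp.entry (ProgX.Base.Spec.ldexp.spec others frames).frame ret u)
    (hpre : ShadowPre others frames u) {s : State} (hrip : s.rip = ProgX.Base.L.ldexp.cut1) (hb : Body_w u₀ u ret s) :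
    ReachVia Lay μ ProgX.Base.WayInv s (Returned (ProgX.Base.conv u₀) (ProgX.Base.Spec.ldexp.spec others frames) u ret) := by
  have he' := he
  v_entry he
  have hsp := hpre.rsp
  have hb' := hb
  obtain ⟨w_rsp, w_kept, hsame, hun, hs1, hs0, w_eq, hdf, hmx⟩ := hb
  have hsse : SseOK s := SseOK.of_masks hmx
  u_walk hcode [hμ.vendor] until [join_w] span [ProgX.Base.L.textLo, ProgX.Base.L.textHi] side (v_side)
  · -- n - 1023 ≤ 1023 (0x102237 taken, `mov ebx, eax` at 0x1022a2)
    refine last_call_w hLay hμ hcode htt he' hpre w_rip (Body_w.spill he_room he_top hb' w_rsp w_kept w_mem w_eq ?_ ?_)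
    · rw [w_flags]
      simp only [X86.User.df_setStatus]
      exact hdf
    · rw [w_mxcsr]
      exact hmx_102223
  · -- n - 2046 ≤ 1023 (0x10224e taken)
    refine last_call_w hLay hμ hcode htt he' hpre w_rip (Body_w.spill he_room he_top hb' w_rsp w_kept w_mem w_eq ?_ ?_)
    · rw [w_flags]
      simp only [X86.User.df_setStatus]
      exact hdf
    · rw [w_mxcsr]
      exact hmx_102239
  · -- n - 2046 > 1023: `mov ebx, 1023 ; jmp` (0x102250)
    refine last_call_w hLay hμ hcode htt he' hpre w_rip (Body_w.spill he_room he_top hb' w_rsp w_kept w_mem w_eq ?_ ?_)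
    · rw [w_flags]
      simp only [X86.User.df_setStatus]
      exact hdf
    · rw [w_mxcsr]
      exact hmx_102239

/-- 0x102269 (cut2), libm.c:35–41: after the return of `two_to(-1022)`: up to two more multiplications, selected by signed
comparisons of `ebx + 1022`, `ebx + 2044`; every path joins at 0x1022a4. -/
theorem low_tail_w {Lay : Layout} (hLay : Lay.hi = 0x1000000) {μ : Microarch} (hμ : UserX.MicroOK μ) {u₀ : State}
    (hcode : HasCodeNat Lay u₀ ProgX.Base.L.ldexp.entry ProgX.Base.Code.code_ldexp.nat ProgX.Base.L.ldexp.size)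
    {others : List Obj} {frames : List (Nat × FrameLayout)}
    (htt : Calls Lay μ ProgX.Base.WayInv (ProgX.Base.conv u₀) ProgX.Base.L.two_to.entry (ProgX.Base.Spec.two_to.spec others frames))
    {u : State} {ret : Word}
    (he : AtEntry (ProgX.Base.conv u₀) ProgX.Base.L.ldexp.entry (ProgX.Base.Spec.ldexp.spec others frames).frame ret u)
    (hpre : ShadowPre others frames u) {s : State} (hrip : s.rip = ProgX.Base.L.ldexp.cut2) (hb : Body_w u₀ u ret s) :
    ReachVia Lay μ ProgX.Base.WayInv s (Returned (ProgX.Base.conv u₀) (ProgX.Base.Spec.ldexp.spec others frames) u ret) := by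
  have he' := he
  v_entry he
  have hsp := hpre.rsp
  have hb' := hb
  obtain ⟨w_rsp, w_kept, hsame, hun, hs1, hs0, w_eq, hdf, hmx⟩ := hb
  have hsse : SseOK s := SseOK.of_masks hmx
  u_walk hcode [hμ.vendor] until [join_w] span [ProgX.Base.L.textLo, ProgX.Base.L.textHi] side (v_side)
  · -- n + 1022 ≥ -1022 (0x102282 taken, `mov ebx, eax ; jmp` at 0x1022b6)
    refine last_call_w hLay hμ hcode htt he' hpre w_rip (Body_w.spill he_room he_top hb' w_rsp w_kept w_mem w_eq ?_ ?_)
    · rw [w_flags]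
      simp only [X86.User.df_setStatus]
      exact hdf
    · rw [w_mxcsr]
      exact hmx_10226e
  · -- n + 2044 ≥ -1022 (0x102299 taken)
    refine last_call_w hLay hμ hcode htt he' hpre w_rip (Body_w.spill he_room he_top hb' w_rsp w_kept w_mem w_eq ?_ ?_)
    · rw [w_flags]
      simp only [X86.User.df_setStatus]
      exact hdf
    · rw [w_mxcsr]
      exact hmx_102284
  · -- n + 2044 < -1022: `mov ebx, -1022 ; jmp` (0x10229b)
    refine last_call_w hLay hμ hcode htt he' hpre w_rip (Body_w.spill he_room he_top hb' w_rsp w_kept w_mem w_eq ?_ ?_)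
    · rw [w_flags]
      simp only [X86.User.df_setStatus]
      exact hdf
    · rw [w_mxcsr]
      exact hmx_102284

end ProgX.Base.Spec.Proved.ldexp
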